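-- pv_equiv track=rewrite | github.com/panton8/scala-bootcamp | solver/main.py | __get_res_sort
-- ===== SOURCE A (Python) =====
-- def __get_res_sort(res_blocks) -> str:
--     res_sort = ''
--     first = True
--     last_block = ''
--     last_combination_strength = 0
--     for block in res_blocks:
--         if first:
--             res_sort = (block[1])
--             first = False
--             last_block = block[0][1]
--             last_combination_strength = block[0][0]
--         else:
--             if block[0][1] == last_block and block[0][0] == last_combination_strength:
--                 res_sort = res_sort + '=' + block[1]
--             else:
--                 res_sort = res_sort + ' ' + block[1]
--             last_block = block[0][1]
--             last_combination_strength = block[0][0]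
--     return res_sort
-- ===== SOURCE B (Python) =====
-- def __get_res_sort(res_blocks) -> str:
--     # Recursively consume one run of consecutive blocks sharing the same key,
--     # join that run's labels with '=', and glue runs together with ' '.
--     if not res_blocks:
--         return ''
--     key = res_blocks[0][0]
--     run = [res_blocks[0][1]]
--     i = 1
--     while i < len(res_blocks) and res_blocks[i][0] == key:
--         run.append(res_blocks[i][1])
--         i += 1
--     head = '='.join(run)
--     rest = res_blocks[i:]
--     if not rest:
--         return head
--     return head + ' ' + __get_res_sort(rest)
-- ===== Notes on version B (the rewrite author's own statement) =====
-- stated objective: alternative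
-- what changed: Replaced A's single stateful scan (first/last_block/last_combination_strength flags) by a recursive run-length decomposition: peel off the maximal run of consecutive blocks with equal key, join that run's labels with '=', and recurse on the remainder, gluing runs with ' '.
import Mathlib
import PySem

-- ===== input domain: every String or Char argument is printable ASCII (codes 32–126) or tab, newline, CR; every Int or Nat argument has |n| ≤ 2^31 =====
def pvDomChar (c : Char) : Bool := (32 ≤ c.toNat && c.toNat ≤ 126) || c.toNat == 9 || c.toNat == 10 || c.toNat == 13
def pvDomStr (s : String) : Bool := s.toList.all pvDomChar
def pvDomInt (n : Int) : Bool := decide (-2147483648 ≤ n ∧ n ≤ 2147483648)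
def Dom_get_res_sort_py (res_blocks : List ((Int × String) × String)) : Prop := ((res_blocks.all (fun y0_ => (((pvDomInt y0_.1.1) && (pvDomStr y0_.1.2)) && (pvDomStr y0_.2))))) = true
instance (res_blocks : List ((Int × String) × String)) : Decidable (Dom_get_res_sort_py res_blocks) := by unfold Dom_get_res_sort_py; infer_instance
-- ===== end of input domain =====

-- B replaces A's stateful scan by a recursive run-length decomposition: peel the maximal
-- run of equal-key blocks, '='-join its labels, glue runs with ' ' (alternative, same cost).

-- ===== PORT A =====
-- state: (res_sort, first, last_block, last_combination_strength)
def get_res_sort_py (res_blocks : List ((Int × String) × String)) : String :=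
  (res_blocks.foldl
    (fun (st : String × Bool × String × Int) block =>
      if st.2.1 then
        (block.2, false, block.1.2, block.1.1)
      else
        if block.1.2 == st.2.2.1 && block.1.1 == st.2.2.2 then
          (st.1 ++ "=" ++ block.2, st.2.1, block.1.2, block.1.1)
        else
          (st.1 ++ " " ++ block.2, st.2.1, block.1.2, block.1.1))
    ("", true, "", 0)).1

-- ===== PORT B =====
-- the while loop collecting the run = takeWhile/dropWhile on the same key test
def get_res_sort_py_alt (res_blocks : List ((Int × String) × String)) : String :=
  match res_blocks with
  | [] => ""
  | b :: tl =>
    match tl.dropWhile (fun x => x.1 == b.1) with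
    | [] => PySem.Str.join "=" (b.2 :: (tl.takeWhile (fun x => x.1 == b.1)).map (fun x => x.2))
    | _ :: _ =>
      PySem.Str.join "=" (b.2 :: (tl.takeWhile (fun x => x.1 == b.1)).map (fun x => x.2))
        ++ " " ++ get_res_sort_py_alt (tl.dropWhile (fun x => x.1 == b.1))
termination_by res_blocks.length
decreasing_by
  simp only [List.length_cons]
  exact Nat.lt_succ_of_le (List.length_dropWhile_le _ _)

-- ===== PRECONDITION & SPEC =====
def Spec_get_res_sort_py (res_blocks : List ((Int × String) × String)) (out : String) : Prop := out = get_res_sort_py_alt res_blocks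
instance (res_blocks : List ((Int × String) × String)) (out : String) : Decidable (Spec_get_res_sort_py res_blocks out) := by unfold Spec_get_res_sort_py; infer_instance

-- ===== CLAIM (what is proved, stated in full; the proofs are below) =====
def Claim_equal_get_res_sort_py : Prop := ∀ (res_blocks : List ((Int × String) × String)), Dom_get_res_sort_py res_blocks → Spec_get_res_sort_py res_blocks (get_res_sort_py res_blocks)

-- ===== LEMMAS AND PROOFS =====

-- common characterisation: the text after the first label, given the previous key
def pvTail (k : Int × String) : List ((Int × String) × String) → String
  | [] => ""
  | x :: xs => (if x.1 == k then "=" else " ") ++ x.2 ++ pvTail x.1 xs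

def pvSpecAll : List ((Int × String) × String) → String
  | [] => ""
  | b :: tl => b.2 ++ pvTail b.1 tl

-- ''.join with "=" separator peels off the head part
theorem joinEq_cons (x y : String) (l : List String) :
    PySem.Str.join "=" (x :: y :: l) = x ++ "=" ++ PySem.Str.join "=" (y :: l) := by
  rw [← String.toList_inj]
  simp only [PySem.Str.toList_join, String.toList_append, List.map_cons]
  rw [PySem.Chars.join_cons_cons]

-- A's loop after the first element computes pvTail
theorem loopA_eq (tl : List ((Int × String) × String))
    (prev : (Int × String) × String) (s : String) :
    (tl.foldl
      (fun (st : String × Bool × String × Int) block =>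
        if st.2.1 then
          (block.2, false, block.1.2, block.1.1)
        else
          if block.1.2 == st.2.2.1 && block.1.1 == st.2.2.2 then
            (st.1 ++ "=" ++ block.2, st.2.1, block.1.2, block.1.1)
          else
            (st.1 ++ " " ++ block.2, st.2.1, block.1.2, block.1.1))
      (s, false, prev.1.2, prev.1.1)).1
    = s ++ pvTail prev.1 tl := by
  induction tl generalizing prev s with
  | nil => simp [pvTail]
  | cons c tl ih =>
    have hcond : (c.1.2 == prev.1.2 && c.1.1 == prev.1.1) = (c.1 == prev.1) := by
      obtain ⟨⟨ci, cs⟩, cl⟩ := c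
      obtain ⟨⟨pi, ps⟩, pl⟩ := prev
      exact Bool.and_comm _ _
    simp only [List.foldl_cons, Bool.false_eq_true, if_false, hcond]
    cases hb : (c.1 == prev.1) <;>
      simp only [Bool.false_eq_true, if_false, if_true] <;>
      · rw [ih]
        simp [pvTail, hb, String.append_assoc]

-- pvTail over a run of blocks whose key equals k
theorem pvTail_run (k : Int × String) (same rest : List ((Int × String) × String))
    (h : ∀ x ∈ same, x.1 = k) :
    pvTail k (same ++ rest)
      = (same.map (fun x => "=" ++ x.2)).foldr (· ++ ·) "" ++ pvTail k rest := by
  induction same with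
  | nil => simp
  | cons c cs ih =>
    have hc : c.1 = k := h c (List.mem_cons_self)
    simp only [List.cons_append, pvTail, hc, beq_self_eq_true, if_true, List.map_cons,
      List.foldr_cons]
    rw [ih (fun x hx => h x (List.mem_cons_of_mem _ hx))]
    simp [String.append_assoc]

-- the '='-join of a run equals the head label plus the folded "="-prefixed labels
theorem joinEq_run (s : String) (labels : List String) :
    PySem.Str.join "=" (s :: labels)
      = s ++ (labels.map (fun l => "=" ++ l)).foldr (· ++ ·) "" := by
  induction labels generalizing s with
  | nil =>
    rw [← String.toList_inj]
    simp [PySem.Str.toList_join, PySem.Chars.join_singleton]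
  | cons y ys ih =>
    rw [joinEq_cons, ih]
    simp [String.append_assoc]

-- B computes pvSpecAll (strong induction on length)
theorem altB_aux : ∀ (n : Nat) (l : List ((Int × String) × String)), l.length ≤ n →
    get_res_sort_py_alt l = pvSpecAll l := by
  intro n
  induction n with
  | zero =>
    intro l h
    have : l = [] := List.eq_nil_of_length_eq_zero (Nat.le_zero.mp h)
    subst this
    rw [get_res_sort_py_alt]
    rfl
  | succ n ih =>
    intro l h
    match l with
    | [] =>
      rw [get_res_sort_py_alt]
      rfl
    | b :: tl =>
      have hkeys : ∀ x ∈ tl.takeWhile (fun x => x.1 == b.1), x.1 = b.1 := by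
        intro x hx
        exact eq_of_beq (List.mem_takeWhile_imp (p := fun (y : (Int × String) × String) => y.1 == b.1) hx)
      have hsplit : tl.takeWhile (fun x => x.1 == b.1) ++ tl.dropWhile (fun x => x.1 == b.1) = tl :=
        List.takeWhile_append_dropWhile
      have ht := pvTail_run b.1 (tl.takeWhile (fun x => x.1 == b.1))
        (tl.dropWhile (fun x => x.1 == b.1)) hkeys
      rw [hsplit] at ht
      rw [get_res_sort_py_alt]
      cases hrest : tl.dropWhile (fun x => x.1 == b.1) with
      | nil =>
        rw [hrest] at ht
        simp only [joinEq_run, pvSpecAll, ht, pvTail]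
        simp [List.map_map, Function.comp_def]
      | cons r rs =>
        rw [hrest] at ht
        have hne : tl.dropWhile (fun (x : (Int × String) × String) => x.1 == b.1) ≠ [] := by
          simp [hrest]
        have h0 := List.head_dropWhile_not (fun (x : (Int × String) × String) => x.1 == b.1) hne
        simp only [hrest, List.head_cons, beq_eq_false_iff_ne] at h0
        have hlen : (r :: rs).length ≤ n := by
          have h1 : (tl.dropWhile (fun x => x.1 == b.1)).length ≤ tl.length :=
            List.length_dropWhile_le _ _
          rw [hrest] at h1
          have h2 : tl.length + 1 ≤ n + 1 := by simpa using h
          omega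
        simp only [ih _ hlen, joinEq_run, pvSpecAll, ht, pvTail]
        simp [h0, List.map_map, Function.comp_def, String.append_assoc]

theorem altB_eq (l : List ((Int × String) × String)) :
    get_res_sort_py_alt l = pvSpecAll l :=
  altB_aux l.length l (Nat.le_refl _)

-- ===== VERDICT (by name: the statement is the Claim_ definition above) =====
theorem get_res_sort_py_spec : Claim_equal_get_res_sort_py := by
  intro res_blocks _
  unfold Spec_get_res_sort_py
  rw [altB_eq]
  unfold get_res_sort_py
  cases res_blocks with
  | nil => rfl
  | cons b tl =>
    simp only [List.foldl_cons, if_true]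
    rw [loopA_eq]
    rfl
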